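-- pv_equiv track=rewrite | github.com/ezmgszi/IT4320Scrum3Trip-Reservation-System | it-4320-final-proj/it-4320-final-proj/flask_wtforms_tutorial/routes.py | create_reservation_code
-- ===== SOURCE A (Python) =====
-- import itertools
--
-- def create_reservation_code(first_name):
--     string_1 = "INFOTC4320"
--     new_list = []
--     for f, b in itertools.zip_longest(first_name, string_1):
--         if f:
--             new_list.append(f)
--         if b:
--             new_list.append(b)
--     return ''.join(new_list)
-- ===== SOURCE B (Python) =====
-- def create_reservation_code(first_name):
--     string_1 = "INFOTC4320"
--     return (''.join(f + b for f, b in zip(first_name, string_1))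
--             + first_name[len(string_1):]
--             + string_1[len(first_name):])
-- ===== Notes on version B (the rewrite author's own statement) =====
-- stated objective: simpler
-- what changed: Replaced the zip_longest loop with truthiness guards and an accumulator list by a min-length zip join plus two closed-form tail slices (exactly one non-empty).
import Mathlib
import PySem

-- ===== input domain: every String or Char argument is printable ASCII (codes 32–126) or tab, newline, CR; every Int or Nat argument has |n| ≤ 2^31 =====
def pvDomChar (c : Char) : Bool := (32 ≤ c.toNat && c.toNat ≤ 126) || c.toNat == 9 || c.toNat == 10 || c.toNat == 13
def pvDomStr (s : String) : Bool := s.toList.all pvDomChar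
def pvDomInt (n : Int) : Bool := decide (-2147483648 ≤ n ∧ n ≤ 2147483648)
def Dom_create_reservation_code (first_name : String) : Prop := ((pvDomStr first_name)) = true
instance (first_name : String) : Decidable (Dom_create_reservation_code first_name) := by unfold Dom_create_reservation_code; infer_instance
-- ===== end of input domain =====

-- B builds the interleaved prefix with a min-length zip and appends the two tail slices in closed form,
-- replacing A's zip_longest loop with truthiness guards (objective: simpler).

-- ===== PORT A =====
-- itertools.zip_longest over two char sequences (fill value None)
def pvZipLongest : List Char → List Char → List (Option Char × Option Char)
  | [], [] => []
  | f :: fs, [] => (some f, none) :: pvZipLongest fs []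
  | [], b :: bs => (none, some b) :: pvZipLongest [] bs
  | f :: fs, b :: bs => (some f, some b) :: pvZipLongest fs bs

-- loop body: 'if f: append f; if b: append b' (a one-char string is always truthy, so truthy = not the None fill)
def pvStepA (acc : List Char) (p : Option Char × Option Char) : List Char :=
  (acc ++ (match p.1 with | some f => [f] | none => []))
    ++ (match p.2 with | some b => [b] | none => [])

def create_reservation_code (first_name : String) : String :=
  let string_1 := "INFOTC4320"
  let new_list := (pvZipLongest first_name.toList string_1.toList).foldl pvStepA []
  String.mk new_list

-- ===== PORT B =====
-- s[k:] with k = a length (k ≥ 0) is exactly List.drop k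
def create_reservation_code_alt (first_name : String) : String :=
  let string_1 := "INFOTC4320"
  String.mk (((first_name.toList.zip string_1.toList).flatMap (fun p => [p.1, p.2]))
    ++ first_name.toList.drop string_1.toList.length
    ++ string_1.toList.drop first_name.toList.length)

-- ===== PRECONDITION & SPEC =====
def Spec_create_reservation_code (first_name : String) (out : String) : Prop := out = create_reservation_code_alt first_name
instance (first_name : String) (out : String) : Decidable (Spec_create_reservation_code first_name out) := by unfold Spec_create_reservation_code; infer_instance

-- ===== CLAIM (what is proved, stated in full; the proofs are below) =====
def Claim_equal_create_reservation_code : Prop := ∀ (first_name : String), Dom_create_reservation_code first_name → Spec_create_reservation_code first_name (create_reservation_code first_name)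

-- ===== LEMMAS AND PROOFS =====

theorem zl_nil_left (bs : List Char) (acc : List Char) :
    (pvZipLongest [] bs).foldl pvStepA acc = acc ++ bs := by
  induction bs generalizing acc with
  | nil => simp [pvZipLongest]
  | cons b bs ih => simp [pvZipLongest, pvStepA, ih]

theorem zl_nil_right (fs : List Char) (acc : List Char) :
    (pvZipLongest fs []).foldl pvStepA acc = acc ++ fs := by
  induction fs generalizing acc with
  | nil => simp [pvZipLongest]
  | cons f fs ih => simp [pvZipLongest, pvStepA, ih]

theorem zl_key (fs : List Char) (bs : List Char) (acc : List Char) :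
    (pvZipLongest fs bs).foldl pvStepA acc =
      acc ++ ((fs.zip bs).flatMap (fun p => [p.1, p.2]))
        ++ fs.drop bs.length ++ bs.drop fs.length := by
  induction fs generalizing bs acc with
  | nil => simp [zl_nil_left]
  | cons f fs ih =>
    cases bs with
    | nil => simp [zl_nil_right]
    | cons b bs => simp [pvZipLongest, pvStepA, ih]

-- ===== VERDICT (by name: the statement is the Claim_ definition above) =====
theorem create_reservation_code_spec : Claim_equal_create_reservation_code := by
  intro first_name _
  unfold Spec_create_reservation_code create_reservation_code create_reservation_code_alt
  simp [zl_key]
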